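-- pv_equiv track=rewrite | github.com/ionicizable/3kAlgos | pdfLabs/main.py | count
-- ===== SOURCE A (Python) =====
-- def count(matrix):
--     positive = 0
--     negative = 0
--     for i in range(len(matrix)):
--         for j in range(len(matrix)):
--             if (matrix[i][j] < 0):
--                 negative += matrix[i][j]
--             else:
--                 positive += matrix[i][j]
--     return positive, negative
-- ===== SOURCE B (Python) =====
-- def count(matrix):
--     n = len(matrix)
--     vals = sorted(matrix[i][j] for i in range(n) for j in range(n))
--     lo, hi = 0, len(vals)
--     while lo < hi:
--         mid = (lo + hi) // 2
--         if vals[mid] < 0: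
--             lo = mid + 1
--         else:
--             hi = mid
--     return sum(vals[lo:]), sum(vals[:lo])
-- ===== Notes on version B (the rewrite author's own statement) =====
-- stated objective: alternative
-- what changed: Instead of one branching two-accumulator scan, B sorts the flattened n*n values, binary-searches the first non-negative position, and returns the sums of the two resulting slices.
import Mathlib
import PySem

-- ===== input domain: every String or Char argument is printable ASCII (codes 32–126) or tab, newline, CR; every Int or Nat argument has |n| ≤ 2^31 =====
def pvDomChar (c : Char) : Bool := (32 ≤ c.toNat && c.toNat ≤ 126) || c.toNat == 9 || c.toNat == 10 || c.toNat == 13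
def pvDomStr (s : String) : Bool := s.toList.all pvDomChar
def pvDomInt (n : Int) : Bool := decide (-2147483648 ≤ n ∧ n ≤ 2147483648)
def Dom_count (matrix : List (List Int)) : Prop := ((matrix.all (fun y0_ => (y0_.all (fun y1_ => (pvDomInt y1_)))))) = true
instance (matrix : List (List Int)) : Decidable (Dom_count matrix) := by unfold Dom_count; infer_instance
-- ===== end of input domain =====

-- B replaces A's branch-accumulator scan by sort + binary-search split; equivalence is about the return value.

-- ===== PORT A =====
-- literal port of A's nested index loops with the two branch accumulators
def count (matrix : List (List Int)) : Int × Int :=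
  (PySem.List.pyRange 0 matrix.length 1).foldl (fun acc i =>
    (PySem.List.pyRange 0 matrix.length 1).foldl (fun acc j =>
      let v := PySem.List.pyGetD (PySem.List.pyGetD matrix i []) j 0
      if v < 0 then (acc.1, acc.2 + v) else (acc.1 + v, acc.2)) acc) (0, 0)

-- ===== PORT B =====
-- the while-loop binary search of Source B: first index with vals[mid] >= 0
def pvBsplit (vals : List Int) (lo hi : Nat) : Nat :=
  if lo < hi then
    let mid := (lo + hi) / 2
    if PySem.List.pyGetD vals (mid : Int) 0 < 0 then pvBsplit vals (mid + 1) hi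
    else pvBsplit vals lo mid
  else lo
termination_by hi - lo
decreasing_by all_goals omega

-- port of B: sort the flattened values, binary-search the negative/non-negative
-- boundary, sum the two slices
def count_alt (matrix : List (List Int)) : Int × Int :=
  let n : Int := matrix.length
  let vals := PySem.List.sorted ((PySem.List.pyRange 0 n 1).flatMap (fun i =>
    (PySem.List.pyRange 0 n 1).map (fun j =>
      PySem.List.pyGetD (PySem.List.pyGetD matrix i []) j 0))) (fun v => v) false
  let lo := pvBsplit vals 0 vals.length
  ((PySem.List.slice vals (some (lo : Int)) none).foldl (· + ·) 0,
   (PySem.List.slice vals none (some (lo : Int))).foldl (· + ·) 0)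

-- ===== PRECONDITION & SPEC =====
-- Pre_ excludes ragged matrices with a row shorter than len(matrix): there Python A
-- raises IndexError (and Python B raises the same way), returning no value.
def Pre_count (matrix : List (List Int)) : Prop :=
  ∀ row ∈ matrix, matrix.length ≤ row.length
instance (matrix : List (List Int)) : Decidable (Pre_count matrix) := by unfold Pre_count; infer_instance
def pvWitness_count : List (List Int) := [[1, -2], [3, 4]]

def Spec_count (matrix : List (List Int)) (out : Int × Int) : Prop := out = count_alt matrix
instance (matrix : List (List Int)) (out : Int × Int) : Decidable (Spec_count matrix out) := by unfold Spec_count; infer_instance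

-- ===== CLAIM (what is proved, stated in full; the proofs are below) =====
def Claim_equal_count : Prop := ∀ (matrix : List (List Int)), Dom_count matrix → Pre_count matrix → Spec_count matrix (count matrix)

-- ===== LEMMAS AND PROOFS =====

-- folding (+) with an arbitrary start is start + sum
theorem pvFoldlAdd (vs : List Int) (a : Int) : vs.foldl (· + ·) a = a + vs.sum := by
  induction vs generalizing a with
  | nil => simp
  | cons v t ih => simp [List.foldl_cons, ih, List.sum_cons]; ring

-- A's branch-accumulator step over a value list, characterised by two filtered sums
theorem pvStepFold (vs : List Int) (s : Int × Int) :
    vs.foldl (fun acc v => if v < 0 then (acc.1, acc.2 + v) else (acc.1 + v, acc.2)) s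
      = (s.1 + (vs.filter (fun v => !decide (v < 0))).sum,
         s.2 + (vs.filter (fun v => decide (v < 0))).sum) := by
  induction vs generalizing s with
  | nil => simp
  | cons v t ih =>
    by_cases h : v < 0 <;> simp [List.foldl_cons, ih, h, List.sum_cons] <;> ring_nf

-- A's nested index loops = the branch-accumulator fold over the flattened value list
theorem pvNest (matrix : List (List Int)) (r l : List Int) (s : Int × Int) :
    l.foldl (fun acc i => r.foldl (fun acc j =>
        let v := PySem.List.pyGetD (PySem.List.pyGetD matrix i []) j 0
        if v < 0 then (acc.1, acc.2 + v) else (acc.1 + v, acc.2)) acc) s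
      = (l.flatMap (fun i => r.map (fun j =>
            PySem.List.pyGetD (PySem.List.pyGetD matrix i []) j 0))).foldl
          (fun acc v => if v < 0 then (acc.1, acc.2 + v) else (acc.1 + v, acc.2)) s := by
  induction l generalizing s with
  | nil => rfl
  | cons i t ih =>
    simp only [List.foldl_cons, List.flatMap_cons, List.foldl_append, ih, List.foldl_map]

-- the binary search returns a boundary: everything before it negative, from it on non-negative
theorem pvBsplitSpec (vals : List Int)
    (hmono : ∀ p q (_ : p < q) (hq : q < vals.length), vals[p] ≤ vals[q]) :
    ∀ lo hi, lo ≤ hi → hi ≤ vals.length →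
    (∀ k (hk : k < vals.length), k < lo → vals[k] < 0) →
    (∀ k (hk : k < vals.length), hi ≤ k → 0 ≤ vals[k]) →
    pvBsplit vals lo hi ≤ vals.length ∧
    (∀ k (hk : k < vals.length), k < pvBsplit vals lo hi → vals[k] < 0) ∧
    (∀ k (hk : k < vals.length), pvBsplit vals lo hi ≤ k → 0 ≤ vals[k]) := by
  intro lo hi
  induction lo, hi using pvBsplit.induct vals with
  | case1 lo hi hlt mid hneg ih =>
    intro hlh hhl hlow hhigh
    have hmidlt : mid < vals.length := by omega
    have hmidget : PySem.List.pyGetD vals ((mid : Nat) : Int) 0 = vals[mid] := by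
      simp [PySem.List.pyGetD_natCast, List.getD_eq_getElem?_getD, List.getElem?_eq_getElem hmidlt]
    have hnegv : vals[mid] < 0 := by rw [← hmidget]; exact hneg
    have hstep : pvBsplit vals lo hi = pvBsplit vals (mid + 1) hi := by
      rw [pvBsplit]
      rw [if_pos hlt]
      show (if PySem.List.pyGetD vals ((mid : Nat) : Int) 0 < 0 then pvBsplit vals (mid + 1) hi
        else pvBsplit vals lo mid) = pvBsplit vals (mid + 1) hi
      exact if_pos hneg
    rw [hstep]
    exact ih (by omega) hhl
      (fun k hk hkl => by
        rcases Nat.lt_or_ge k mid with h | h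
        · exact lt_of_le_of_lt (hmono k mid h hmidlt) hnegv
        · have : k = mid := by omega
          subst this; exact hnegv) hhigh
  | case2 lo hi hlt mid hneg ih =>
    intro hlh hhl hlow hhigh
    have hmidlt : mid < vals.length := by omega
    have hmidget : PySem.List.pyGetD vals ((mid : Nat) : Int) 0 = vals[mid] := by
      simp [PySem.List.pyGetD_natCast, List.getD_eq_getElem?_getD, List.getElem?_eq_getElem hmidlt]
    have hnonv : 0 ≤ vals[mid] := by rw [← hmidget]; exact not_lt.mp hneg
    have hstep : pvBsplit vals lo hi = pvBsplit vals lo mid := by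
      rw [pvBsplit]
      rw [if_pos hlt]
      show (if PySem.List.pyGetD vals ((mid : Nat) : Int) 0 < 0 then pvBsplit vals (mid + 1) hi
        else pvBsplit vals lo mid) = pvBsplit vals lo mid
      exact if_neg hneg
    rw [hstep]
    exact ih (by omega) (by omega) hlow
      (fun k hk hkl => by
        rcases Nat.eq_or_lt_of_le hkl with h | h
        · subst h; exact hnonv
        · exact le_trans hnonv (hmono mid k h hk))
  | case3 lo hi hlt =>
    intro hlh hhl hlow hhigh
    have hstep : pvBsplit vals lo hi = lo := by
      rw [pvBsplit]; rw [if_neg hlt]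
    rw [hstep]
    exact ⟨by omega, fun k hk hkl => hlow k hk hkl,
           fun k hk hkl => hhigh k hk (by omega)⟩

-- a list that is negative up to r and non-negative from r splits into its two filters
theorem pvTakeDropFilter : ∀ (vals : List Int) (r : Nat), r ≤ vals.length →
    (∀ k (hk : k < vals.length), k < r → vals[k] < 0) →
    (∀ k (hk : k < vals.length), r ≤ k → 0 ≤ vals[k]) →
    vals.take r = vals.filter (fun v => decide (v < 0)) ∧
    vals.drop r = vals.filter (fun v => !decide (v < 0)) := by
  intro vals
  induction vals with
  | nil => intro r _ _ _; simp
  | cons v t ih =>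
    intro r hr hlow hhigh
    cases r with
    | zero =>
      have hall : ∀ x ∈ v :: t, ¬ x < 0 := by
        intro x hx
        rw [List.mem_iff_getElem] at hx
        obtain ⟨k, hk, rfl⟩ := hx
        exact not_lt.mpr (hhigh k hk (Nat.zero_le _))
      constructor
      · have h1 : List.filter (fun v => decide (v < 0)) (v :: t) = [] :=
          List.filter_eq_nil_iff.mpr (fun x hx => by simpa using hall x hx)
        simp [h1]
      · have h2 : List.filter (fun v => !decide (v < 0)) (v :: t) = v :: t :=
          List.filter_eq_self.mpr (fun x hx => by simpa using hall x hx)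
        simp [h2]
    | succ r' =>
      have hv : v < 0 := hlow 0 (by simp) (by omega)
      have := ih r' (by simpa using hr)
        (fun k hk hkl => hlow (k+1) (by simpa using hk) (by omega))
        (fun k hk hkl => hhigh (k+1) (by simpa using hk) (by omega))
      simp only [List.take_succ_cons, List.drop_succ_cons, List.filter_cons, hv,
        decide_true, Bool.not_true, if_true]
      exact ⟨by rw [this.1], this.2⟩

-- ===== VERDICT (by name: the statement is the Claim_ definition above) =====
theorem count_spec : Claim_equal_count := by
  intro matrix _ _
  unfold Spec_count count count_alt
  rw [pvNest, pvStepFold]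
  simp only []
  set vals0 := (PySem.List.pyRange 0 (matrix.length : Int) 1).flatMap (fun i =>
    (PySem.List.pyRange 0 (matrix.length : Int) 1).map (fun j =>
      PySem.List.pyGetD (PySem.List.pyGetD matrix i []) j 0)) with hv0
  set vals := PySem.List.sorted vals0 (fun v => v) false with hv
  have hperm : vals.Perm vals0 := PySem.List.sorted_perm _ _ _
  have hpw : vals.Pairwise (· ≤ ·) := by
    have := PySem.List.sorted_pairwise vals0 (fun v => v)
    simpa [hv] using this
  have hmono : ∀ p q (_ : p < q) (hq : q < vals.length), vals[p] ≤ vals[q] := by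
    intro p q hpq hq
    exact List.pairwise_iff_getElem.mp hpw p q (by omega) hq hpq
  obtain ⟨hle, hneg, hnon⟩ := pvBsplitSpec vals hmono 0 vals.length (Nat.zero_le _)
    (le_refl _) (fun k hk h => by omega) (fun k hk h => by omega)
  obtain ⟨htake, hdrop⟩ := pvTakeDropFilter vals (pvBsplit vals 0 vals.length) hle hneg hnon
  rw [PySem.List.slice_from_natCast, PySem.List.slice_to_natCast, htake, hdrop,
    pvFoldlAdd, pvFoldlAdd]
  have h1 : (vals.filter (fun v => !decide (v < 0))).sum
      = (vals0.filter (fun v => !decide (v < 0))).sum := (hperm.filter _).sum_eq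
  have h2 : (vals.filter (fun v => decide (v < 0))).sum
      = (vals0.filter (fun v => decide (v < 0))).sum := (hperm.filter _).sum_eq
  simp [h1, h2]
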